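-- pv_equiv track=rewrite | github.com/TadejMohorcic/advent-of-code | 2015/2015-21.py | win_cost
-- ===== SOURCE A (Python) =====
-- def calculate_damage(player, boss):
--     player_damage = player[1] - boss[2] if player[1] - boss[2] > 0 else 1
--     boss_damage = boss[1] - player[2] if boss[1] - player[2] > 0 else 1
--
--     player_turns = boss[0] // player_damage
--     boss_turns = player[0] // boss_damage
--
--     if boss[0] % player_damage != 0:
--         player_turns += 1
--
--     if player[0] % boss_damage != 0:
--         boss_turns += 1
--
--     return player_turns <= boss_turns
--
-- def win_cost(storage, boss, part):
--     weapons, armor, rings = storage[0], storage[1], storage[2]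
--     armor.append((0,0,0))
--     rings.append((0,0,0,0))
--     rings.append((0,0,0,0))
--
--     win_cost = 0 if part else 1000
--
--     for w in weapons:
--         for a in armor:
--             for r in rings:
--                 rings_2 = rings.copy()
--                 rings_2.remove(r)
--                 for p in rings_2:
--                     cost = w[0] + a[0] + r[1] + p[1]
--                     player = [100, w[1] + a[1] + r[2] + p[2], w[2] + a[2] + r[3] + p[3]]
--                     if part:
--                         if cost > win_cost:
--                             if not calculate_damage(player, boss):
--                                 win_cost = cost
--                     else:
--                         if cost < win_cost:
--                             if calculate_damage(player, boss):
--                                 win_cost = cost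
--
--     return win_cost
-- ===== SOURCE B (Python) =====
-- def calculate_damage(player, boss):
--     player_damage = max(1, player[1] - boss[2])
--     boss_damage = max(1, boss[1] - player[2])
--     # ceil division: ceil(a/b) == -(-a // b)
--     return -(-boss[0] // player_damage) <= -(-player[0] // boss_damage)
--
-- def win_cost(storage, boss, part):
--     weapons, armor, rings = storage[0], storage[1], storage[2]
--     armor.append((0,0,0))
--     rings.append((0,0,0,0))
--     rings.append((0,0,0,0))
--     best = 0 if part else 1000
--     if not weapons:
--         return best
--     better = max if part else min
--
--     def table(items):
--         t = {}
--         for it in items: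
--             key = (it[1], it[2])
--             t[key] = better(t[key], it[0]) if key in t else it[0]
--         return t
--
--     def merge(t1, t2):
--         out = {}
--         for (d1, a1), c1 in t1.items():
--             for (d2, a2), c2 in t2.items():
--                 key = (d1 + d2, a1 + a2)
--                 c = c1 + c2
--                 out[key] = better(out[key], c) if key in out else c
--         return out
--
--     pairs = {}
--     for i, r in enumerate(rings):
--         for p in rings[i + 1:]:
--             key = (r[2] + p[2], r[3] + p[3])
--             c = r[1] + p[1]
--             pairs[key] = better(pairs[key], c) if key in pairs else c
--
--     loadouts = merge(merge(table(weapons), table(armor)), pairs)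
--
--     for (dmg, arm), c in loadouts.items():
--         wins = calculate_damage([100, dmg, arm], boss)
--         if part:
--             if not wins:
--                 best = max(best, c)
--         else:
--             if wins:
--                 best = min(best, c)
--     return best
-- ===== Notes on version B (the rewrite author's own statement) =====
-- stated objective: alternative
-- what changed: B replaces A's brute-force scan over every weapon/armor/ring-pair loadout with a dynamic-programming merge of stat-indexed dictionaries: it builds per-category (damage,armor)->best-cost tables, merges them pairwise (collapsing all loadouts with equal total stats to one entry keeping the min/max cost), and runs the fight check once per distinct stat pair instead of once per loadout; its fight check uses max(1,...) damage and ceiling division instead of floor division plus a remainder branch.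
-- outside the precondition, e.g. on win_cost([[[1200, 0, 0]], [[0, 0, 0]], []], [], False): A returns 1000, B raises IndexError; on win_cost([[[0, 0, 0]], [], []], [], True): A returns 0, B raises IndexError
import Mathlib
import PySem

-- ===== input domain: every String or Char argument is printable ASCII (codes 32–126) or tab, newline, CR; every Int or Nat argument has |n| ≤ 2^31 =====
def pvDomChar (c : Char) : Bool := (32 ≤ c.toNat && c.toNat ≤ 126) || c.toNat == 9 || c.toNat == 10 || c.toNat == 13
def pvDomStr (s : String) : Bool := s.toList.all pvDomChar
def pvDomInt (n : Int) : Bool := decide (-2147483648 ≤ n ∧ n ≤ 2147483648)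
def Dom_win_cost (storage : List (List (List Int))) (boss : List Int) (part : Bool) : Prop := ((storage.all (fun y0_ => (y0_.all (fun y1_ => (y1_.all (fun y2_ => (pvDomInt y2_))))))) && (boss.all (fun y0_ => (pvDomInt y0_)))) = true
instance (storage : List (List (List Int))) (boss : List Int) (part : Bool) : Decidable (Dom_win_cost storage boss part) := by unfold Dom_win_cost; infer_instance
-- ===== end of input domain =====

-- B replaces A's brute-force scan over every loadout with a dynamic-programming merge of
-- stat-indexed dictionaries ((damage,armor) -> best cost per category, merged pairwise),
-- fighting the boss once per distinct stat total; objective: alternative algorithm.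
-- Like A, B appends the naked-gear entries to the armor/ring lists in place (same side
-- effect); the equivalence proved here is about the return value.

-- ===== PORT A =====
-- xs[i] for a literal nonnegative index; Pre_ keeps every accessed index in range,
-- so the .getD default is never the value used.
def pvGet (l : List Int) (i : Int) : Int := (PySem.List.pyGet? l i).getD 0

def calculate_damage (player boss : List Int) : Bool :=
  let player_damage := if pvGet player 1 - pvGet boss 2 > 0 then pvGet player 1 - pvGet boss 2 else 1
  let boss_damage := if pvGet boss 1 - pvGet player 2 > 0 then pvGet boss 1 - pvGet player 2 else 1
  let player_turns := PySem.Int.floordiv (pvGet boss 0) player_damage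
  let boss_turns := PySem.Int.floordiv (pvGet player 0) boss_damage
  let player_turns := if PySem.Int.mod (pvGet boss 0) player_damage ≠ 0 then player_turns + 1 else player_turns
  let boss_turns := if PySem.Int.mod (pvGet player 0) boss_damage ≠ 0 then boss_turns + 1 else boss_turns
  decide (player_turns ≤ boss_turns)

def win_cost (storage : List (List (List Int))) (boss : List Int) (part : Bool) : Int :=
  let weapons := (PySem.List.pyGet? storage 0).getD []
  let armor := (PySem.List.pyGet? storage 1).getD [] ++ [[0, 0, 0]]
  let rings := (PySem.List.pyGet? storage 2).getD [] ++ [[0, 0, 0, 0], [0, 0, 0, 0]]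
  let init : Int := if part then 0 else 1000
  weapons.foldl (fun acc w =>
    armor.foldl (fun acc a =>
      rings.foldl (fun acc r =>
        let rings_2 := (PySem.List.remove? rings r).getD []
        rings_2.foldl (fun acc p =>
          let cost := pvGet w 0 + pvGet a 0 + pvGet r 1 + pvGet p 1
          let player := [100, pvGet w 1 + pvGet a 1 + pvGet r 2 + pvGet p 2,
                              pvGet w 2 + pvGet a 2 + pvGet r 3 + pvGet p 3]
          if part then
            (if cost > acc ∧ ¬(calculate_damage player boss = true) then cost else acc)
          else
            (if cost < acc ∧ calculate_damage player boss = true then cost else acc)) acc) acc) acc) init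

-- ===== PORT B =====
def calculate_damage_alt (player boss : List Int) : Bool :=
  let player_damage := max 1 (pvGet player 1 - pvGet boss 2)
  let boss_damage := max 1 (pvGet boss 1 - pvGet player 2)
  -- ceil division: ceil(a/b) == -(-a // b)
  decide (-(PySem.Int.floordiv (-(pvGet boss 0)) player_damage)
          ≤ -(PySem.Int.floordiv (-(pvGet player 0)) boss_damage))

-- better = max if part else min
def pvBetter (part : Bool) (x y : Int) : Int := if part then max x y else min x y

-- t[key] = better(t[key], c) if key in t else c
def pvUpd (part : Bool) (t : PySem.Dict (Int × Int) Int) (k : Int × Int) (c : Int) :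
    PySem.Dict (Int × Int) Int :=
  t.insert k (if t.contains k then pvBetter part (t.getD k 0) c else c)

def pvTable (part : Bool) (items : List (List Int)) : PySem.Dict (Int × Int) Int :=
  items.foldl (fun t it => pvUpd part t (pvGet it 1, pvGet it 2) (pvGet it 0)) PySem.Dict.empty

def pvMerge (part : Bool) (t1 t2 : PySem.Dict (Int × Int) Int) : PySem.Dict (Int × Int) Int :=
  t1.items.foldl (fun out e1 =>
    t2.items.foldl (fun out e2 =>
      pvUpd part out (e1.1.1 + e2.1.1, e1.1.2 + e2.1.2) (e1.2 + e2.2)) out) PySem.Dict.empty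

def pvPairs (part : Bool) (rings : List (List Int)) : PySem.Dict (Int × Int) Int :=
  (PySem.List.enumerate rings).foldl (fun t ir =>
    (PySem.List.slice rings (some (ir.1 + 1)) none).foldl (fun t p =>
      pvUpd part t (pvGet ir.2 2 + pvGet p 2, pvGet ir.2 3 + pvGet p 3)
        (pvGet ir.2 1 + pvGet p 1)) t) PySem.Dict.empty

def win_cost_alt (storage : List (List (List Int))) (boss : List Int) (part : Bool) : Int :=
  let weapons := (PySem.List.pyGet? storage 0).getD []
  let armor := (PySem.List.pyGet? storage 1).getD [] ++ [[0, 0, 0]]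
  let rings := (PySem.List.pyGet? storage 2).getD [] ++ [[0, 0, 0, 0], [0, 0, 0, 0]]
  let best : Int := if part then 0 else 1000
  if weapons = [] then best else
  let loadouts := pvMerge part (pvMerge part (pvTable part weapons) (pvTable part armor))
                    (pvPairs part rings)
  loadouts.items.foldl (fun best e =>
    let wins := calculate_damage_alt [100, e.1.1, e.1.2] boss
    if part then (if !wins then max best e.2 else best)
    else (if wins then min best e.2 else best)) best

-- ===== PRECONDITION & SPEC =====
-- Pre_ excludes the inputs on which the Python A raises an IndexError (storage shorter
-- than 3, or nonempty weapons with a gear row shorter than the indices the loop body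
-- reads: 3 for weapons/armor, 4 for rings), plus, for nonempty weapons, a boss list
-- shorter than 3: A only indexes the boss when a cost comparison fires and so can still
-- return there, but B's stat-indexed tables always fight and raise.
def Pre_win_cost (storage : List (List (List Int))) (boss : List Int) (part : Bool) : Prop :=
  3 ≤ storage.length ∧
  (storage.getD 0 [] ≠ [] →
    3 ≤ boss.length ∧
    (∀ w ∈ storage.getD 0 [], 3 ≤ w.length) ∧
    (∀ a ∈ storage.getD 1 [], 3 ≤ a.length) ∧
    (∀ r ∈ storage.getD 2 [], 4 ≤ r.length))
instance (storage : List (List (List Int))) (boss : List Int) (part : Bool) : Decidable (Pre_win_cost storage boss part) := by unfold Pre_win_cost; infer_instance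

def pvWitness_win_cost : List (List (List Int)) × List Int × Bool :=
  ([[[10, 4, 0]], [[5, 0, 2]], [[25, 0, 1, 0]]], [50, 6, 2], false)

def Spec_win_cost (storage : List (List (List Int))) (boss : List Int) (part : Bool) (out : Int) : Prop := out = win_cost_alt storage boss part
instance (storage : List (List (List Int))) (boss : List Int) (part : Bool) (out : Int) : Decidable (Spec_win_cost storage boss part out) := by unfold Spec_win_cost; infer_instance

-- ===== CLAIM (what is proved, stated in full; the proofs are below) =====
def Claim_equal_win_cost : Prop := ∀ (storage : List (List (List Int))) (boss : List Int) (part : Bool), Dom_win_cost storage boss part → Pre_win_cost storage boss part → Spec_win_cost storage boss part (win_cost storage boss part)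

-- ===== LEMMAS AND PROOFS =====

-- the order "v is at least as good as c" that pvBetter optimises (≥ for max, ≤ for min)
def pvRel (part : Bool) (v c : Int) : Prop := if part then c ≤ v else v ≤ c

lemma pvBetter_sel (part : Bool) (x y : Int) : pvBetter part x y = x ∨ pvBetter part x y = y := by
  cases part <;> simp only [pvBetter, if_true, if_false, Bool.false_eq_true] <;> omega

lemma pvRel_better_left (part : Bool) (x y : Int) : pvRel part (pvBetter part x y) x := by
  cases part <;> simp only [pvBetter, pvRel, if_true, if_false, Bool.false_eq_true] <;> omega

lemma pvRel_better_right (part : Bool) (x y : Int) : pvRel part (pvBetter part x y) y := by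
  cases part <;> simp only [pvBetter, pvRel, if_true, if_false, Bool.false_eq_true] <;> omega

lemma pvRel_refl (part : Bool) (x : Int) : pvRel part x x := by
  cases part <;> simp [pvRel]

lemma pvRel_trans (part : Bool) {a b c : Int} (h1 : pvRel part a b) (h2 : pvRel part b c) :
    pvRel part a c := by
  cases part <;> simp only [pvRel, if_true, if_false, Bool.false_eq_true] at * <;> omega

lemma pvRel_antisymm (part : Bool) {a b : Int} (h1 : pvRel part a b) (h2 : pvRel part b a) :
    a = b := by
  cases part <;> simp only [pvRel, if_true, if_false, Bool.false_eq_true] at * <;> omega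

lemma pvRel_add (part : Bool) {a b c d : Int} (h1 : pvRel part a b) (h2 : pvRel part c d) :
    pvRel part (a + c) (b + d) := by
  cases part <;> simp only [pvRel, if_true, if_false, Bool.false_eq_true] at * <;> omega

-- generic "upsert fold" that pvTable / pvMerge / pvPairs all reduce to
def pvBuild (part : Bool) (L : List ((Int × Int) × Int)) (d : PySem.Dict (Int × Int) Int) :
    PySem.Dict (Int × Int) Int :=
  L.foldl (fun d e => pvUpd part d e.1 e.2) d

-- "T is the stat-indexed summary of the loadout list L"
def pvRep (part : Bool) (T : PySem.Dict (Int × Int) Int) (L : List ((Int × Int) × Int)) : Prop :=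
  (∀ p ∈ T.items, p ∈ L) ∧ (∀ q ∈ L, ∃ v, T.get? q.1 = some v ∧ pvRel part v q.2)

lemma upd_get?_eq (part : Bool) (t : PySem.Dict (Int × Int) Int) (k : Int × Int) (c : Int) :
    ∃ v, (pvUpd part t k c).get? k = some v ∧ pvRel part v c := by
  refine ⟨_, PySem.Dict.get?_insert_self t k _, ?_⟩
  split_ifs with h
  · exact pvRel_better_right part _ _
  · exact pvRel_refl part _

lemma build_persist (part : Bool) (L : List ((Int × Int) × Int)) :
    ∀ (d : PySem.Dict (Int × Int) Int) (k : Int × Int) (v : Int), d.get? k = some v →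
      ∃ v', (pvBuild part L d).get? k = some v' ∧ pvRel part v' v := by
  induction L with
  | nil => exact fun d k v h => ⟨v, h, pvRel_refl part v⟩
  | cons e L ih =>
    intro d k v h
    show ∃ v', (pvBuild part L (pvUpd part d e.1 e.2)).get? k = some v' ∧ pvRel part v' v
    by_cases hk : k = e.1
    · subst hk
      have hcont : d.contains e.1 = true := by
        rw [PySem.Dict.contains_eq_isSome_get?, h]; rfl
      have hstep : (pvUpd part d e.1 e.2).get? e.1 = some (pvBetter part v e.2) := by
        unfold pvUpd
        rw [hcont, if_pos rfl, PySem.Dict.getD_of_get?_eq_some d 0 h,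
          PySem.Dict.get?_insert_self]
      obtain ⟨v', hv', hrel⟩ := ih _ _ _ hstep
      exact ⟨v', hv', pvRel_trans part hrel (pvRel_better_left part v e.2)⟩
    · apply ih
      unfold pvUpd
      rw [PySem.Dict.get?_insert_of_ne _ _ hk, h]

lemma build_dom (part : Bool) (L : List ((Int × Int) × Int)) :
    ∀ (d : PySem.Dict (Int × Int) Int) (q : (Int × Int) × Int), q ∈ L →
      ∃ v, (pvBuild part L d).get? q.1 = some v ∧ pvRel part v q.2 := by
  induction L with
  | nil => intro d q h; simp at h
  | cons e L ih =>
    intro d q hq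
    rcases List.mem_cons.1 hq with rfl | hq
    · obtain ⟨v, hv, hrel⟩ := upd_get?_eq part d q.1 q.2
      obtain ⟨v', hv', hrel'⟩ := build_persist part L _ _ _ hv
      exact ⟨v', hv', pvRel_trans part hrel' hrel⟩
    · exact ih _ _ hq

lemma build_sound (part : Bool) (L : List ((Int × Int) × Int)) :
    ∀ (d : PySem.Dict (Int × Int) Int), d.keys.Nodup →
      ∀ p ∈ (pvBuild part L d).items, p ∈ d.items ∨ p ∈ L := by
  induction L with
  | nil => exact fun d _ p hp => Or.inl hp
  | cons e L ih =>
    intro d hnd p hp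
    have hnd' : (pvUpd part d e.1 e.2).keys.Nodup :=
      PySem.Dict.nodup_keys_insert _ _ _ hnd
    rcases ih _ hnd' p hp with hin | hin
    · unfold pvUpd at hin
      rcases (PySem.Dict.mem_items_insert _ _ _ _).1 hin with rfl | ⟨hd, _⟩
      · by_cases hc : d.contains e.1 = true
        · rw [if_pos hc]
          have hg : (d.get? e.1).isSome = true := by
            rw [← PySem.Dict.contains_eq_isSome_get? d e.1]; exact hc
          obtain ⟨w, hw⟩ := Option.isSome_iff_exists.1 hg
          rw [PySem.Dict.getD_of_get?_eq_some d 0 hw]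
          rcases pvBetter_sel part w e.2 with hsel | hsel
          · rw [hsel]; exact Or.inl (PySem.Dict.mem_items_of_get?_eq_some _ hw)
          · rw [hsel]; exact Or.inr (List.mem_cons_self)
        · rw [if_neg hc]; exact Or.inr (List.mem_cons_self)
      · exact Or.inl hd
    · exact Or.inr (List.mem_cons_of_mem _ hin)

lemma rep_build (part : Bool) (L : List ((Int × Int) × Int)) :
    pvRep part (pvBuild part L PySem.Dict.empty) L := by
  refine ⟨fun p hp => ?_, build_dom part L PySem.Dict.empty⟩
  rcases build_sound part L PySem.Dict.empty PySem.Dict.nodup_keys_empty p hp with h | h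
  · have he : (PySem.Dict.empty : PySem.Dict (Int × Int) Int).items = [] := rfl
    rw [he] at h; simp at h
  · exact h

lemma rep_weaken (part : Bool) {T : PySem.Dict (Int × Int) Int}
    {M L : List ((Int × Int) × Int)} (hrep : pvRep part T M)
    (hsub : ∀ m ∈ M, m ∈ L)
    (hdom : ∀ q ∈ L, ∃ m ∈ M, m.1 = q.1 ∧ pvRel part m.2 q.2) : pvRep part T L := by
  refine ⟨fun p hp => hsub p (hrep.1 p hp), fun q hq => ?_⟩
  obtain ⟨m, hm, hkey, hrel⟩ := hdom q hq
  obtain ⟨v, hv, hrel'⟩ := hrep.2 m hm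
  exact ⟨v, by rw [← hkey]; exact hv, pvRel_trans part hrel' hrel⟩

-- combined entry of two loadout summaries: stats add, costs add
def pvComb (q1 q2 : (Int × Int) × Int) : (Int × Int) × Int :=
  ((q1.1.1 + q2.1.1, q1.1.2 + q2.1.2), q1.2 + q2.2)

def pvProdSum (L1 L2 : List ((Int × Int) × Int)) : List ((Int × Int) × Int) :=
  L1.flatMap (fun q1 => L2.map (fun q2 => pvComb q1 q2))

def pvWl (ws : List (List Int)) : List ((Int × Int) × Int) :=
  ws.map (fun w => ((pvGet w 1, pvGet w 2), pvGet w 0))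

def pvPl (rings : List (List Int)) : List ((Int × Int) × Int) :=
  (PySem.List.enumerate rings).flatMap (fun ir =>
    (PySem.List.slice rings (some (ir.1 + 1)) none).map (fun p =>
      ((pvGet ir.2 2 + pvGet p 2, pvGet ir.2 3 + pvGet p 3), pvGet ir.2 1 + pvGet p 1)))

lemma table_eq_build (part : Bool) (items : List (List Int)) :
    pvTable part items = pvBuild part (pvWl items) PySem.Dict.empty := by
  simp [pvTable, pvBuild, pvWl, List.foldl_map]

lemma pairs_eq_build (part : Bool) (rings : List (List Int)) :
    pvPairs part rings = pvBuild part (pvPl rings) PySem.Dict.empty := by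
  simp [pvPairs, pvBuild, pvPl, List.foldl_flatMap, List.foldl_map]

lemma merge_eq_build (part : Bool) (t1 t2 : PySem.Dict (Int × Int) Int) :
    pvMerge part t1 t2 = pvBuild part (pvProdSum t1.items t2.items) PySem.Dict.empty := by
  simp [pvMerge, pvBuild, pvProdSum, pvComb, List.foldl_flatMap, List.foldl_map]

lemma rep_merge (part : Bool) {t1 t2 : PySem.Dict (Int × Int) Int}
    {L1 L2 : List ((Int × Int) × Int)} (h1 : pvRep part t1 L1) (h2 : pvRep part t2 L2) :
    pvRep part (pvMerge part t1 t2) (pvProdSum L1 L2) := by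
  rw [merge_eq_build]
  refine rep_weaken part (rep_build part (pvProdSum t1.items t2.items)) ?_ ?_
  · intro m hm
    simp only [pvProdSum, List.mem_flatMap, List.mem_map] at hm ⊢
    obtain ⟨q1, hq1, q2, hq2, rfl⟩ := hm
    exact ⟨q1, h1.1 q1 hq1, q2, h2.1 q2 hq2, rfl⟩
  · intro q hq
    simp only [pvProdSum, List.mem_flatMap, List.mem_map] at hq
    obtain ⟨q1, hq1, q2, hq2, rfl⟩ := hq
    obtain ⟨v1, hv1, hr1⟩ := h1.2 q1 hq1
    obtain ⟨v2, hv2, hr2⟩ := h2.2 q2 hq2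
    refine ⟨pvComb (q1.1, v1) (q2.1, v2), ?_, rfl, pvRel_add part hr1 hr2⟩
    simp only [pvProdSum, List.mem_flatMap, List.mem_map]
    exact ⟨(q1.1, v1), PySem.Dict.mem_items_of_get?_eq_some _ hv1,
           (q2.1, v2), PySem.Dict.mem_items_of_get?_eq_some _ hv2, rfl⟩

-- the guarded min/max reduction both final loops are instances of
def pvG (part : Bool) (good : Int × Int → Bool) (P : List ((Int × Int) × Int)) (init : Int) : Int :=
  P.foldl (fun acc e => if good e.1 then pvBetter part acc e.2 else acc) init

lemma pvG_lb (part : Bool) (good : Int × Int → Bool) (P : List ((Int × Int) × Int)) :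
    ∀ init : Int, pvRel part (pvG part good P init) init ∧
      ∀ e ∈ P, good e.1 = true → pvRel part (pvG part good P init) e.2 := by
  induction P with
  | nil => intro init; exact ⟨pvRel_refl part init, by simp⟩
  | cons e P ih =>
    intro init
    have hG : pvG part good (e :: P) init
        = pvG part good P (if good e.1 then pvBetter part init e.2 else init) := rfl
    obtain ⟨h1, h2⟩ := ih (if good e.1 then pvBetter part init e.2 else init)
    constructor
    · refine pvRel_trans part (by rw [hG]; exact h1) ?_
      split_ifs with hg
      · exact pvRel_better_left part _ _
      · exact pvRel_refl part _
    · intro f hf hgf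
      rcases List.mem_cons.1 hf with rfl | hf
      · refine pvRel_trans part (by rw [hG]; exact h1) ?_
        rw [if_pos hgf]
        exact pvRel_better_right part _ _
      · rw [hG]; exact h2 f hf hgf

lemma pvG_mem (part : Bool) (good : Int × Int → Bool) (P : List ((Int × Int) × Int)) :
    ∀ init : Int, pvG part good P init = init ∨
      ∃ e ∈ P, good e.1 = true ∧ pvG part good P init = e.2 := by
  induction P with
  | nil => intro init; exact Or.inl rfl
  | cons e P ih =>
    intro init
    have hG : pvG part good (e :: P) init
        = pvG part good P (if good e.1 then pvBetter part init e.2 else init) := rfl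
    rcases ih (if good e.1 then pvBetter part init e.2 else init) with h | ⟨f, hf, hgf, hv⟩
    · rw [hG, h]
      split_ifs with hg
      · rcases pvBetter_sel part init e.2 with hsel | hsel
        · exact Or.inl hsel
        · exact Or.inr ⟨e, List.mem_cons_self, hg, hsel⟩
      · exact Or.inl rfl
    · exact Or.inr ⟨f, List.mem_cons_of_mem _ hf, hgf, by rw [hG]; exact hv⟩

lemma pvG_eq (part : Bool) (good : Int × Int → Bool) (P1 P2 : List ((Int × Int) × Int))
    (init : Int)
    (h12 : ∀ e ∈ P1, ∃ m ∈ P2, m.1 = e.1 ∧ pvRel part m.2 e.2)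
    (h21 : ∀ e ∈ P2, ∃ m ∈ P1, m.1 = e.1 ∧ pvRel part m.2 e.2) :
    pvG part good P1 init = pvG part good P2 init := by
  have key : ∀ Q1 Q2 : List ((Int × Int) × Int),
      (∀ e ∈ Q1, ∃ m ∈ Q2, m.1 = e.1 ∧ pvRel part m.2 e.2) →
      pvRel part (pvG part good Q2 init) (pvG part good Q1 init) := by
    intro Q1 Q2 hdom
    rcases pvG_mem part good Q1 init with h | ⟨e, he, hge, hv⟩
    · rw [h]; exact (pvG_lb part good Q2 init).1
    · obtain ⟨m, hm, hkey, hrel⟩ := hdom e he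
      rw [hv]
      refine pvRel_trans part ((pvG_lb part good Q2 init).2 m hm ?_) hrel
      rw [hkey]; exact hge
  exact pvRel_antisymm part (key P2 P1 h21) (key P1 P2 h12)

-- A's loadout list
def pvLA (weapons armor rings : List (List Int)) : List ((Int × Int) × Int) :=
  weapons.flatMap (fun w => armor.flatMap (fun a => rings.flatMap (fun r =>
    ((PySem.List.remove? rings r).getD []).map (fun p =>
      ((pvGet w 1 + pvGet a 1 + pvGet r 2 + pvGet p 2,
        pvGet w 2 + pvGet a 2 + pvGet r 3 + pvGet p 3),
       pvGet w 0 + pvGet a 0 + pvGet r 1 + pvGet p 1)))))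

def pvLF (weapons armor rings : List (List Int)) : List ((Int × Int) × Int) :=
  pvProdSum (pvProdSum (pvWl weapons) (pvWl armor)) (pvPl rings)

-- the fight predicate, a function of the stat key only
def pvGood (part : Bool) (boss : List Int) (k : Int × Int) : Bool :=
  if part then !calculate_damage_alt [100, k.1, k.2] boss
  else calculate_damage_alt [100, k.1, k.2] boss

-- ceiling division: floor quotient bumped on a nonzero remainder equals -((-a) // b)
lemma ceil_div_eq (a b : Int) (hb : 0 < b) :
    (if PySem.Int.mod a b ≠ 0 then PySem.Int.floordiv a b + 1 else PySem.Int.floordiv a b)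
      = -(PySem.Int.floordiv (-a) b) := by
  have h := PySem.Int.floordiv_mul_add_mod a b
  have h0 := PySem.Int.mod_nonneg a hb
  have h1 := PySem.Int.mod_lt a hb
  symm
  rw [PySem.Int.neg_floordiv_neg_eq_iff_of_pos hb]
  split_ifs with hm
  · have hm' : 0 < PySem.Int.mod a b := by omega
    constructor <;> nlinarith
  · have hm' : PySem.Int.mod a b = 0 := by omega
    constructor <;> nlinarith

lemma calc_eq (player boss : List Int) :
    calculate_damage player boss = calculate_damage_alt player boss := by
  unfold calculate_damage calculate_damage_alt
  have hmax : ∀ x : Int, (if x > 0 then x else 1) = max 1 x := by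
    intro x; rcases max_cases 1 x with ⟨h1, h2⟩ | ⟨h1, h2⟩ <;> split_ifs <;> omega
  have hpos : ∀ x : Int, (0 : Int) < max 1 x := fun x => lt_max_iff.2 (Or.inl one_pos)
  simp only [hmax]
  rw [ceil_div_eq _ _ (hpos _), ceil_div_eq _ _ (hpos _)]

lemma A_eq_pvG (weapons armor rings : List (List Int)) (boss : List Int) (part : Bool)
    (init : Int) :
    weapons.foldl (fun acc w => armor.foldl (fun acc a => rings.foldl (fun acc r =>
      ((PySem.List.remove? rings r).getD []).foldl (fun acc p =>
        let cost := pvGet w 0 + pvGet a 0 + pvGet r 1 + pvGet p 1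
        let player := [100, pvGet w 1 + pvGet a 1 + pvGet r 2 + pvGet p 2,
                            pvGet w 2 + pvGet a 2 + pvGet r 3 + pvGet p 3]
        if part then
          (if cost > acc ∧ ¬(calculate_damage player boss = true) then cost else acc)
        else
          (if cost < acc ∧ calculate_damage player boss = true then cost else acc)) acc) acc) acc) init
    = pvG part (pvGood part boss) (pvLA weapons armor rings) init := by
  unfold pvLA pvG
  simp only [List.foldl_flatMap, List.foldl_map]
  apply PySem.List.foldl_congr_mem; intro acc w _
  apply PySem.List.foldl_congr_mem; intro acc a _
  apply PySem.List.foldl_congr_mem; intro acc r _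
  apply PySem.List.foldl_congr_mem; intro acc p _
  simp only [calc_eq, pvGood, pvBetter]
  cases part <;>
    simp only [Bool.false_eq_true, reduceIte] <;>
    split_ifs <;> simp_all <;> omega

lemma B_eq_pvG (boss : List Int) (part : Bool) (D : PySem.Dict (Int × Int) Int) (init : Int) :
    D.items.foldl (fun best e =>
      let wins := calculate_damage_alt [100, e.1.1, e.1.2] boss
      if part then (if !wins then max best e.2 else best)
      else (if wins then min best e.2 else best)) init
    = pvG part (pvGood part boss) D.items init := by
  cases part <;> rfl

lemma pvPl_of_indices (rings : List (List Int)) (i j : Nat) (hij : i < j)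
    (hj : j < rings.length) :
    ((pvGet (rings[i]'(by omega)) 2 + pvGet rings[j] 2,
      pvGet (rings[i]'(by omega)) 3 + pvGet rings[j] 3),
      pvGet (rings[i]'(by omega)) 1 + pvGet rings[j] 1) ∈ pvPl rings := by
  unfold pvPl
  rw [List.mem_flatMap]
  refine ⟨((i : Int), rings[i]'(by omega)), ?_, ?_⟩
  · exact (PySem.List.mem_enumerate_iff rings 0 _).2 ⟨i, by omega, by simp⟩
  · rw [List.mem_map]
    refine ⟨rings[j], ?_, rfl⟩
    have hs : PySem.List.slice rings (some ((i : Int) + 1)) none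
        = List.drop ((i : Int) + 1).toNat rings := PySem.List.slice_from rings (by positivity)
    have ht : ((i : Int) + 1).toNat = i + 1 := by omega
    rw [hs, ht]
    have hl : j - (i + 1) < (List.drop (i + 1) rings).length := by
      simp only [List.length_drop]; omega
    have hg : (List.drop (i + 1) rings)[j - (i + 1)]'hl = rings[j] := by
      rw [List.getElem_drop]; congr 1; omega
    rw [← hg]; exact List.getElem_mem hl

lemma pvPl_elim (rings : List (List Int)) :
    ∀ q ∈ pvPl rings, ∃ (i j : Nat) (hi : i < rings.length) (hj : j < rings.length),
      i < j ∧ q = ((pvGet rings[i] 2 + pvGet rings[j] 2,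
                    pvGet rings[i] 3 + pvGet rings[j] 3),
                   pvGet rings[i] 1 + pvGet rings[j] 1) := by
  intro q hq
  unfold pvPl at hq
  rw [List.mem_flatMap] at hq
  obtain ⟨ir, hir, hq⟩ := hq
  obtain ⟨k, hk, rfl⟩ := (PySem.List.mem_enumerate_iff rings 0 ir).1 hir
  rw [List.mem_map] at hq
  obtain ⟨p, hp, rfl⟩ := hq
  have hs : PySem.List.slice rings (some (0 + (k : Int) + 1)) none
      = List.drop (0 + (k : Int) + 1).toNat rings := PySem.List.slice_from rings (by positivity)
  have ht : (0 + (k : Int) + 1).toNat = k + 1 := by omega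
  rw [hs, ht] at hp
  obtain ⟨d, hd, hpd⟩ := List.getElem_of_mem hp
  have hdlen : k + 1 + d < rings.length := by
    simp only [List.length_drop] at hd; omega
  have hpg : rings[k + 1 + d]'hdlen = p := by rw [← hpd, List.getElem_drop]
  exact ⟨k, k + 1 + d, by omega, hdlen, by omega, by rw [hpg]⟩

lemma ring_pair_LA (rings : List (List Int)) (r p : List Int) (hr : r ∈ rings)
    (hp : p ∈ rings.erase r) :
    ∃ q ∈ pvPl rings,
      q = ((pvGet r 2 + pvGet p 2, pvGet r 3 + pvGet p 3), pvGet r 1 + pvGet p 1) := by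
  have hflen : rings.idxOf r < rings.length := List.idxOf_lt_length_of_mem hr
  have hfr : rings[rings.idxOf r]'hflen = r := List.getElem_idxOf hflen
  have herase : rings.erase r = rings.eraseIdx (rings.idxOf r) :=
    List.erase_eq_eraseIdx_of_idxOf rfl
  rw [herase, List.eraseIdx_eq_take_drop_succ, List.mem_append] at hp
  rcases hp with hp | hp
  · obtain ⟨j, hjlen, hpj⟩ := List.getElem_of_mem hp
    have hjf : j < rings.idxOf r := by
      simp only [List.length_take] at hjlen; omega
    have hpj' : rings[j]'(by omega) = p := by rw [← hpj, List.getElem_take]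
    refine ⟨_, pvPl_of_indices rings j (rings.idxOf r) hjf hflen, ?_⟩
    rw [hfr, hpj']
    simp only [Prod.mk.injEq]
    omega
  · obtain ⟨d, hd, hpd⟩ := List.getElem_of_mem hp
    have hdlen : rings.idxOf r + 1 + d < rings.length := by
      simp only [List.length_drop] at hd; omega
    have hpg : rings[rings.idxOf r + 1 + d]'hdlen = p := by rw [← hpd, List.getElem_drop]
    refine ⟨_, pvPl_of_indices rings (rings.idxOf r) (rings.idxOf r + 1 + d) (by omega) hdlen, ?_⟩
    rw [hfr, hpg]

lemma ring_pair_back (rings : List (List Int)) :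
    ∀ q ∈ pvPl rings, ∃ r ∈ rings, ∃ p ∈ rings.erase r,
      q = ((pvGet r 2 + pvGet p 2, pvGet r 3 + pvGet p 3), pvGet r 1 + pvGet p 1) := by
  intro q hq
  obtain ⟨i, j, hi, hj, hij, rfl⟩ := pvPl_elim rings q hq
  refine ⟨rings[i], List.getElem_mem hi, rings[j], ?_, rfl⟩
  by_cases hpr : rings[j] = rings[i]
  · have h1 : rings[i] ∈ List.take (i + 1) rings := by
      have hb : i < (List.take (i + 1) rings).length := by
        simp only [List.length_take]; omega
      have : (List.take (i + 1) rings)[i]'hb = rings[i] := List.getElem_take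
      rw [← this]; exact List.getElem_mem hb
    have h2 : rings[i] ∈ List.drop (i + 1) rings := by
      have hb : j - (i + 1) < (List.drop (i + 1) rings).length := by
        simp only [List.length_drop]; omega
      have : (List.drop (i + 1) rings)[j - (i + 1)]'hb = rings[j] := by
        rw [List.getElem_drop]; congr 1; omega
      rw [← hpr, ← this]; exact List.getElem_mem hb
    have hcount : 2 ≤ List.count rings[i] rings := by
      have hsplit : List.count rings[i] rings
          = List.count rings[i] (List.take (i + 1) rings)
            + List.count rings[i] (List.drop (i + 1) rings) := by
        rw [← List.count_append, List.take_append_drop]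
      have c1 := List.count_pos_iff.2 h1
      have c2 := List.count_pos_iff.2 h2
      omega
    rw [hpr]
    apply List.count_pos_iff.1
    rw [List.count_erase_self]
    omega
  · exact (List.mem_erase_of_ne hpr).2 (List.getElem_mem hj)

lemma mem_LF_of_mem_LA (weapons armor rings : List (List Int)) :
    ∀ e ∈ pvLA weapons armor rings, e ∈ pvLF weapons armor rings := by
  intro e he
  simp only [pvLA, List.mem_flatMap, List.mem_map] at he
  obtain ⟨w, hw, a, ha, r, hrr, p, hpp, rfl⟩ := he
  have hrm : (PySem.List.remove? rings r).getD [] = rings.erase r := by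
    rw [PySem.List.remove?_eq_some_erase rings r hrr]; rfl
  rw [hrm] at hpp
  obtain ⟨q, hq, hqe⟩ := ring_pair_LA rings r p hrr hpp
  simp only [pvLF, pvProdSum, pvWl, List.mem_flatMap, List.mem_map]
  refine ⟨pvComb ((pvGet w 1, pvGet w 2), pvGet w 0) ((pvGet a 1, pvGet a 2), pvGet a 0),
    ⟨((pvGet w 1, pvGet w 2), pvGet w 0), ⟨w, hw, rfl⟩,
     ((pvGet a 1, pvGet a 2), pvGet a 0), ⟨a, ha, rfl⟩, rfl⟩, q, hq, ?_⟩
  rw [hqe]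
  simp only [pvComb, Prod.mk.injEq]
  omega

lemma mem_LA_of_mem_LF (weapons armor rings : List (List Int)) :
    ∀ e ∈ pvLF weapons armor rings, e ∈ pvLA weapons armor rings := by
  intro e he
  simp only [pvLF, pvProdSum, pvWl, List.mem_flatMap, List.mem_map] at he
  obtain ⟨q1, ⟨qw, ⟨w, hw, rfl⟩, qa, ⟨a, ha, rfl⟩, rfl⟩, q, hq, rfl⟩ := he
  obtain ⟨r, hrr, p, hpp, rfl⟩ := ring_pair_back rings q hq
  simp only [pvLA, List.mem_flatMap, List.mem_map]
  have hrm : (PySem.List.remove? rings r).getD [] = rings.erase r := by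
    rw [PySem.List.remove?_eq_some_erase rings r hrr]; rfl
  refine ⟨w, hw, a, ha, r, hrr, p, by rw [hrm]; exact hpp, ?_⟩
  simp only [pvComb, Prod.mk.injEq]
  omega

-- ===== VERDICT (by name: the statement is the Claim_ definition above) =====
theorem win_cost_spec : Claim_equal_win_cost := by
  intro storage boss part _hdom _hpre
  unfold Spec_win_cost win_cost win_cost_alt
  by_cases hwe : (PySem.List.pyGet? storage 0).getD [] = []
  · rw [A_eq_pvG]
    simp only [hwe, pvLA, List.flatMap_nil, reduceIte]
    rfl
  rw [A_eq_pvG, if_neg hwe, B_eq_pvG]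
  set weapons := (PySem.List.pyGet? storage 0).getD [] with hw
  set armor := (PySem.List.pyGet? storage 1).getD [] ++ [[0, 0, 0]] with ha
  set rings := (PySem.List.pyGet? storage 2).getD [] ++ [[0, 0, 0, 0], [0, 0, 0, 0]] with hr
  have hrepW : pvRep part (pvTable part weapons) (pvWl weapons) := by
    rw [table_eq_build]; exact rep_build part _
  have hrepA : pvRep part (pvTable part armor) (pvWl armor) := by
    rw [table_eq_build]; exact rep_build part _
  have hrepP : pvRep part (pvPairs part rings) (pvPl rings) := by
    rw [pairs_eq_build]; exact rep_build part _
  have hrep : pvRep part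
      (pvMerge part (pvMerge part (pvTable part weapons) (pvTable part armor)) (pvPairs part rings))
      (pvLF weapons armor rings) :=
    rep_merge part (rep_merge part hrepW hrepA) hrepP
  apply pvG_eq
  · intro e he
    obtain ⟨v, hv, hrel⟩ := hrep.2 e (mem_LF_of_mem_LA weapons armor rings e he)
    exact ⟨(e.1, v), PySem.Dict.mem_items_of_get?_eq_some _ hv, rfl, hrel⟩
  · intro e he
    exact ⟨e, mem_LA_of_mem_LF weapons armor rings e (hrep.1 e he), rfl, pvRel_refl part _⟩
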